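-- pv_equiv track=rewrite | github.com/Tigralt/laser-printer-controller | matrix.py | load_vectors
-- ===== SOURCE A (Python) =====
-- def load_vectors(matrix):
--     vectors = []
--     searching = True
--     for (y, line) in enumerate(matrix):
--         for (x, value) in enumerate(line):
--             if searching and value == 1: # Line found, increment length now
--                 vectors.append({ "x": x, "y": y, "length": 1 })
--                 searching = False
--             elif not searching and value == 1: # Increment line length
--                 vectors[-1]["length"] += 1
--             elif not searching and value == 0: # Stop line length incrementation
--                 searching = True
--     return vectors
-- ===== SOURCE B (Python) =====
-- def load_vectors(matrix):
--     # Flatten to (x, y, value) triples; a run starts at a 1, ends at the next 0,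
--     # and its length is the number of 1s in between.
--     cells = [(x, y, v) for y, line in enumerate(matrix) for x, v in enumerate(line)]
--     vectors = []
--     i, n = 0, len(cells)
--     while i < n:
--         if cells[i][2] == 1:
--             x, y = cells[i][0], cells[i][1]
--             length = 0
--             while i < n and cells[i][2] != 0:
--                 length += cells[i][2] == 1
--                 i += 1
--             vectors.append({"x": x, "y": y, "length": length})
--         else:
--             i += 1
--     return vectors
-- ===== Notes on version B (the rewrite author's own statement) =====
-- stated objective: alternative
-- what changed: Replaces A's single stateful per-cell scan (searching flag, in-place bump of the last dict) by flattening the matrix into (x, y, value) triples and an index-based scan that, at each 1, counts the 1s up to the next 0 and emits one complete vector.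
import Mathlib
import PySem

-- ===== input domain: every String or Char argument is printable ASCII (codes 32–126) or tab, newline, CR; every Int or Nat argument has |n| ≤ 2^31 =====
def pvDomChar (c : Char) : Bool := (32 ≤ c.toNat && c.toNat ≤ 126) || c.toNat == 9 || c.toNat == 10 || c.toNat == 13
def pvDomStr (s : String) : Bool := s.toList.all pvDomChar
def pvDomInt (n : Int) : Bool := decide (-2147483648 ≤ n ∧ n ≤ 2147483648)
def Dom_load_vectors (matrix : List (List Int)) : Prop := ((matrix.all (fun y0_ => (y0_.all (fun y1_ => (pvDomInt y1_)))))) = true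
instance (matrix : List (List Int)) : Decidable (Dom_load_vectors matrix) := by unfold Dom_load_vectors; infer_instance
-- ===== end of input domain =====

-- B flattens the matrix and scans it by index, emitting each run (start 1, end at next 0,
-- length = number of 1s in between) in one step (objective: alternative decomposition, same cost).

-- ===== PORT A =====
-- vectors[-1]["length"] += 1 : update the "length" entry of the last dict
def pvBumpLast (vectors : List (List (String × Int))) : List (List (String × Int)) :=
  match vectors.getLast? with
  | none => vectors   -- unreachable in A: searching is false only after an append
  | some d => vectors.dropLast ++
      [d.map (fun kv => if kv.1 = "length" then (kv.1, kv.2 + 1) else kv)]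

def load_vectors (matrix : List (List Int)) : List (List (String × Int)) :=
  let st := (PySem.List.enumerate matrix).foldl (fun st (p : Int × List Int) =>
    (PySem.List.enumerate p.2).foldl (fun st (q : Int × Int) =>
      let vectors := st.1
      let searching := st.2
      if searching && (q.2 == 1) then
        (vectors ++ [[("x", q.1), ("y", p.1), ("length", (1 : Int))]], false)
      else if !searching && (q.2 == 1) then
        (pvBumpLast vectors, searching)
      else if !searching && (q.2 == 0) then
        (vectors, true)
      else st) st) (([], true) : List (List (String × Int)) × Bool)
  st.1

-- ===== PORT B =====
-- cells = [(x, y, v) for y, line in enumerate(matrix) for x, v in enumerate(line)]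
def pvCells (matrix : List (List Int)) : List (Int × Int × Int) :=
  (PySem.List.enumerate matrix).flatMap (fun p =>
    (PySem.List.enumerate p.2).map (fun q => (q.1, p.1, q.2)))

-- the while-loop scan: at a 1-cell, advance to the next 0 counting the 1s passed
-- (incl. the opening cell), emit one vector and resume there; at any other cell advance
def pvRunScan : List (Int × Int × Int) → List (List (String × Int))
  | [] => []
  | c :: rest =>
    if c.2.2 == 1 then
      let seg := rest.takeWhile (fun d => d.2.2 != 0)
      [("x", c.1), ("y", c.2.1),
        ("length", (1 : Int) + ((seg.filter (fun d => d.2.2 == 1)).length : Int))]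
        :: pvRunScan (rest.drop seg.length)
    else pvRunScan rest
termination_by l => l.length
decreasing_by
  · have : (rest.takeWhile (fun d : Int × Int × Int => d.2.2 != 0)).length ≤ rest.length :=
      List.Sublist.length_le (List.takeWhile_sublist _)
    simp only [List.length_drop, List.length_cons]; omega
  · simp

def load_vectors_alt (matrix : List (List Int)) : List (List (String × Int)) :=
  pvRunScan (pvCells matrix)

-- ===== PRECONDITION & SPEC =====
def Spec_load_vectors (matrix : List (List Int)) (out : List (List (String × Int))) : Prop := out = load_vectors_alt matrix
instance (matrix : List (List Int)) (out : List (List (String × Int))) : Decidable (Spec_load_vectors matrix out) := by unfold Spec_load_vectors; infer_instance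

-- ===== CLAIM (what is proved, stated in full; the proofs are below) =====
def Claim_equal_load_vectors : Prop := ∀ (matrix : List (List Int)), Dom_load_vectors matrix → Spec_load_vectors matrix (load_vectors matrix)

-- ===== LEMMAS AND PROOFS =====

-- A's per-cell step, on (x, y, value) triples
def pvStep (st : List (List (String × Int)) × Bool) (c : Int × Int × Int) :
    List (List (String × Int)) × Bool :=
  if st.2 && (c.2.2 == 1) then
    (st.1 ++ [[("x", c.1), ("y", c.2.1), ("length", (1 : Int))]], false)
  else if !st.2 && (c.2.2 == 1) then
    (pvBumpLast st.1, st.2)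
  else if !st.2 && (c.2.2 == 0) then
    (st.1, true)
  else st

lemma foldl_flatMap_pvStep (l : List (Int × List Int)) (st : List (List (String × Int)) × Bool) :
    (l.flatMap (fun p => (PySem.List.enumerate p.2).map (fun q => (q.1, p.1, q.2)))).foldl pvStep st
    = l.foldl (fun st p => ((PySem.List.enumerate p.2).map (fun q => (q.1, p.1, q.2))).foldl pvStep st) st := by
  induction l generalizing st with
  | nil => rfl
  | cons p l ih => simp [List.flatMap_cons, List.foldl_append, ih]

lemma loadA_as_fold (matrix : List (List Int)) :
    load_vectors matrix = ((pvCells matrix).foldl pvStep ([], true)).1 := by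
  unfold load_vectors pvCells
  rw [foldl_flatMap_pvStep]
  simp only [List.foldl_map]
  rfl

lemma pvRunScan_nil : pvRunScan [] = [] := by rw [pvRunScan.eq_def]

lemma pvRunScan_cons_ne_one (c : Int × Int × Int) (rest : List (Int × Int × Int))
    (h : c.2.2 ≠ 1) : pvRunScan (c :: rest) = pvRunScan rest := by
  rw [pvRunScan.eq_def]; simp [h]

lemma pvRunScan_cons_one (c : Int × Int × Int) (rest : List (Int × Int × Int))
    (h : c.2.2 = 1) :
    pvRunScan (c :: rest)
      = [("x", c.1), ("y", c.2.1),
          ("length", (1 : Int) +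
            (((rest.takeWhile (fun d => d.2.2 != 0)).filter (fun d => d.2.2 == 1)).length : Int))]
        :: pvRunScan (rest.drop (rest.takeWhile (fun d => d.2.2 != 0)).length) := by
  rw [pvRunScan.eq_def]; simp [h]

-- the heart: A's stateful fold over the cell list is B's run scan
lemma pvScan (l : List (Int × Int × Int)) :
    (∀ acc, ((l.foldl pvStep (acc, true))).1 = acc ++ pvRunScan l)
    ∧ (∀ (acc : List (List (String × Int))) (x y n : Int),
        ((l.foldl pvStep (acc ++ [[("x", x), ("y", y), ("length", n)]], false))).1
        = acc ++ [("x", x), ("y", y),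
            ("length", n +
              ((((l.takeWhile (fun d => d.2.2 != 0)).filter (fun d => d.2.2 == 1)).length : Int)))]
              :: pvRunScan (l.drop (l.takeWhile (fun d => d.2.2 != 0)).length)) := by
  induction l with
  | nil => simp [pvRunScan_nil]
  | cons c rest ih =>
    constructor
    · intro acc
      by_cases h1 : c.2.2 = 1
      · have hstep : pvStep (acc, true) c
            = (acc ++ [[("x", c.1), ("y", c.2.1), ("length", (1 : Int))]], false) := by
          unfold pvStep; simp [h1]
        rw [List.foldl_cons, hstep, ih.2 acc c.1 c.2.1 1, pvRunScan_cons_one c rest h1]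
      · have hstep : pvStep (acc, true) c = (acc, true) := by
          unfold pvStep; simp [h1]
        rw [List.foldl_cons, hstep, pvRunScan_cons_ne_one c rest h1]
        exact ih.1 acc
    · intro acc x y n
      by_cases h1 : c.2.2 = 1
      · have hbump : pvBumpLast (acc ++ [[("x", x), ("y", y), ("length", n)]])
            = acc ++ [[("x", x), ("y", y), ("length", n + 1)]] := by
          unfold pvBumpLast; simp
        have hstep : pvStep (acc ++ [[("x", x), ("y", y), ("length", n)]], false) c
            = (acc ++ [[("x", x), ("y", y), ("length", n + 1)]], false) := by
          unfold pvStep; simp [h1, hbump]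
        rw [List.foldl_cons, hstep, ih.2 acc x y (n + 1)]
        have htw : (c :: rest).takeWhile (fun d => d.2.2 != 0)
            = c :: rest.takeWhile (fun d => d.2.2 != 0) := by
          simp [h1]
        rw [htw]
        simp only [List.length_cons, List.drop_succ_cons, List.filter_cons]
        have hc1 : (fun d : Int × Int × Int => d.2.2 == 1) c = true := by simpa using h1
        simp only [hc1, if_true, List.length_cons]
        have : n + 1 + (((rest.takeWhile (fun d => d.2.2 != 0)).filter
                (fun d => d.2.2 == 1)).length : Int)
            = n + ((((rest.takeWhile (fun d => d.2.2 != 0)).filter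
                (fun d => d.2.2 == 1)).length : Nat) + 1 : Nat) := by
          push_cast; ring
        rw [this]
      · by_cases h0 : c.2.2 = 0
        · have hstep : pvStep (acc ++ [[("x", x), ("y", y), ("length", n)]], false) c
              = (acc ++ [[("x", x), ("y", y), ("length", n)]], true) := by
            unfold pvStep; simp [h0]
          have htw : (c :: rest).takeWhile (fun d => d.2.2 != 0) = [] := by
            simp [h0]
          rw [List.foldl_cons, hstep, ih.1, htw]
          simp [pvRunScan_cons_ne_one c rest h1]
        · have hstep : pvStep (acc ++ [[("x", x), ("y", y), ("length", n)]], false) c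
              = (acc ++ [[("x", x), ("y", y), ("length", n)]], false) := by
            unfold pvStep; simp [h1, h0]
          rw [List.foldl_cons, hstep, ih.2 acc x y n]
          have htw : (c :: rest).takeWhile (fun d => d.2.2 != 0)
              = c :: rest.takeWhile (fun d => d.2.2 != 0) := by
            simp [h0]
          rw [htw]
          simp only [List.length_cons, List.drop_succ_cons, List.filter_cons]
          have hc1 : (fun d : Int × Int × Int => d.2.2 == 1) c = false := by simpa using h1
          simp only [hc1, if_false, Bool.false_eq_true]

-- ===== VERDICT (by name: the statement is the Claim_ definition above) =====
theorem load_vectors_spec : Claim_equal_load_vectors := by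
  intro matrix _
  unfold Spec_load_vectors load_vectors_alt
  rw [loadA_as_fold]
  simpa using (pvScan (pvCells matrix)).1 []
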